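-- pv_equiv track=rewrite | github.com/sarvanithin/ClaimPilot | backend/agents/charge_capture.py | _infer_em_code
-- ===== SOURCE A (Python) =====
-- def _infer_em_code(note_lower: str, encounter_type: str) -> str | None:
--     """Infer an E&M code from encounter type and note complexity."""
--     et = encounter_type.lower()
--
--     # ED visits
--     if "emergency" in et or "ed visit" in et:
--         if any(w in note_lower for w in ["threat to life", "critical", "stemi", "intubat"]):
--             return "99285"
--         elif any(w in note_lower for w in ["high severity", "admitted", "acute"]):
--             return "99284"
--         elif "moderate" in note_lower:
--             return "99283"
--         return "99283"
--
--     # Inpatient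
--     if "hospital" in et or "inpatient" in et or "admission" in et:
--         if any(w in note_lower for w in ["high complexity", "icu", "critical"]):
--             return "99223"
--         elif "moderate" in note_lower:
--             return "99222"
--         return "99221"
--
--     # Office visits
--     if any(w in note_lower for w in ["new patient", "initial consultation"]):
--         if any(w in note_lower for w in ["high complexity", "multiple comorbidities"]):
--             return "99205"
--         elif any(w in note_lower for w in ["moderate complexity", "several"]):
--             return "99204"
--         return "99203"
--
--     # Default established patient
--     note_length = len(note_lower)
--     if note_length > 1500 or any(w in note_lower for w in ["multiple", "comorbid", "complex"]):
--         return "99215"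
--     elif note_length > 800:
--         return "99214"
--     elif note_length > 400:
--         return "99213"
--     return "99212"
-- ===== SOURCE B (Python) =====
-- _LEVELS = {
--     "ed":    {"threat to life": 2, "critical": 2, "stemi": 2, "intubat": 2,
--               "high severity": 1, "admitted": 1, "acute": 1},
--     "inpt":  {"high complexity": 2, "icu": 2, "critical": 2, "moderate": 1},
--     "newpt": {"high complexity": 2, "multiple comorbidities": 2,
--               "moderate complexity": 1, "several": 1},
-- }
--
-- _CODES = {
--     "ed":    ["99283", "99284", "99285"],
--     "inpt":  ["99221", "99222", "99223"],
--     "newpt": ["99203", "99204", "99205"],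
--     "estab": ["99212", "99213", "99214", "99215"],
-- }
--
--
-- def _infer_em_code(note_lower: str, encounter_type: str) -> str | None:
--     """Two-stage: classify the encounter, compute a numeric severity tier
--     (max matched keyword level / count of exceeded length thresholds),
--     then index a code table."""
--     et = encounter_type.lower()
--     if "emergency" in et or "ed visit" in et:
--         cls = "ed"
--     elif "hospital" in et or "inpatient" in et or "admission" in et:
--         cls = "inpt"
--     elif "new patient" in note_lower or "initial consultation" in note_lower:
--         cls = "newpt"
--     else:
--         cls = "estab"
--
--     if cls == "estab":
--         if any(w in note_lower for w in ("multiple", "comorbid", "complex")):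
--             tier = 3
--         else:
--             tier = sum(len(note_lower) > t for t in (400, 800, 1500))
--     else:
--         tier = max((lvl for w, lvl in _LEVELS[cls].items() if w in note_lower), default=0)
--     return _CODES[cls][tier]
-- ===== Notes on version B (the rewrite author's own statement) =====
-- stated objective: alternative
-- what changed: Replaces A's nested first-match if/elif chains by a two-stage table scheme: classify the encounter into a class, compute a numeric severity tier (max matched keyword level from a per-class level dict, or the count of exceeded length thresholds), then index a per-class code list.
import Mathlib
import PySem

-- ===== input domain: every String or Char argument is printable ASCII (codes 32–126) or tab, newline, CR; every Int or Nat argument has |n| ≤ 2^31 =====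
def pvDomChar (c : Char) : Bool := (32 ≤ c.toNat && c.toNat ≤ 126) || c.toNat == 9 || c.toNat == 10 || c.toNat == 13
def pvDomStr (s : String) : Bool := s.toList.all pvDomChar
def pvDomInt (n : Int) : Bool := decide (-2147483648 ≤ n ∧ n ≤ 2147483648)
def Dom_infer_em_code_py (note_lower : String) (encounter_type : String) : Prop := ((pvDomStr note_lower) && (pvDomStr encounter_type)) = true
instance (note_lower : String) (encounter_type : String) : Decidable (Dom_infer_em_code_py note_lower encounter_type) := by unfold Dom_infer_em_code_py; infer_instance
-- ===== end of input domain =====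

-- B replaces A's nested first-match if/elif chains by a two-stage scheme: classify the
-- encounter, compute a numeric severity tier (max matched keyword level / count of
-- exceeded length thresholds), then index a per-class code table (simpler decomposition, same cost).

-- ===== PORT A =====
def infer_em_code_py (note_lower : String) (encounter_type : String) : Option String :=
  let et := PySem.Str.lower encounter_type
  if PySem.Str.isIn "emergency" et || PySem.Str.isIn "ed visit" et then
    if ["threat to life", "critical", "stemi", "intubat"].any (fun w => PySem.Str.isIn w note_lower) then
      some "99285"
    else if ["high severity", "admitted", "acute"].any (fun w => PySem.Str.isIn w note_lower) then
      some "99284"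
    else if PySem.Str.isIn "moderate" note_lower then
      some "99283"
    else
      some "99283"
  else if PySem.Str.isIn "hospital" et || PySem.Str.isIn "inpatient" et || PySem.Str.isIn "admission" et then
    if ["high complexity", "icu", "critical"].any (fun w => PySem.Str.isIn w note_lower) then
      some "99223"
    else if PySem.Str.isIn "moderate" note_lower then
      some "99222"
    else
      some "99221"
  else if ["new patient", "initial consultation"].any (fun w => PySem.Str.isIn w note_lower) then
    if ["high complexity", "multiple comorbidities"].any (fun w => PySem.Str.isIn w note_lower) then
      some "99205"
    else if ["moderate complexity", "several"].any (fun w => PySem.Str.isIn w note_lower) then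
      some "99204"
    else
      some "99203"
  else
    let note_length := PySem.Str.len note_lower
    if note_length > 1500 || ["multiple", "comorbid", "complex"].any (fun w => PySem.Str.isIn w note_lower) then
      some "99215"
    else if note_length > 800 then
      some "99214"
    else if note_length > 400 then
      some "99213"
    else
      some "99212"

-- ===== PORT B =====
-- Source B's keyword-level tables (_LEVELS) for the three keyword-scored classes
def emLevels (cls : String) : List (String × Int) :=
  if cls == "ed" then
    [("threat to life", 2), ("critical", 2), ("stemi", 2), ("intubat", 2),
     ("high severity", 1), ("admitted", 1), ("acute", 1)]
  else if cls == "inpt" then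
    [("high complexity", 2), ("icu", 2), ("critical", 2), ("moderate", 1)]
  else
    [("high complexity", 2), ("multiple comorbidities", 2),
     ("moderate complexity", 1), ("several", 1)]

-- Source B's code table (_CODES)
def emCodes (cls : String) : List String :=
  if cls == "ed" then ["99283", "99284", "99285"]
  else if cls == "inpt" then ["99221", "99222", "99223"]
  else if cls == "newpt" then ["99203", "99204", "99205"]
  else ["99212", "99213", "99214", "99215"]

-- max(lvl for w, lvl in levels if w in note, default=0)
def emMaxLevel (note : String) (levels : List (String × Int)) : Int :=
  levels.foldl (fun acc p => if PySem.Str.isIn p.1 note then max acc p.2 else acc) 0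

def infer_em_code_py_alt (note_lower : String) (encounter_type : String) : Option String :=
  let et := PySem.Str.lower encounter_type
  let cls :=
    if PySem.Str.isIn "emergency" et || PySem.Str.isIn "ed visit" et then "ed"
    else if PySem.Str.isIn "hospital" et || PySem.Str.isIn "inpatient" et || PySem.Str.isIn "admission" et then "inpt"
    else if PySem.Str.isIn "new patient" note_lower || PySem.Str.isIn "initial consultation" note_lower then "newpt"
    else "estab"
  let tier : Int :=
    if cls == "estab" then
      if ["multiple", "comorbid", "complex"].any (fun w => PySem.Str.isIn w note_lower) then 3
      else (([400, 800, 1500] : List Int).map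
              (fun t => if PySem.Str.len note_lower > t then (1 : Int) else 0)).sum
    else emMaxLevel note_lower (emLevels cls)
  PySem.List.pyGet? (emCodes cls) tier

-- ===== PRECONDITION & SPEC =====
def Spec_infer_em_code_py (note_lower : String) (encounter_type : String) (out : Option String) : Prop := out = infer_em_code_py_alt note_lower encounter_type
instance (note_lower : String) (encounter_type : String) (out : Option String) : Decidable (Spec_infer_em_code_py note_lower encounter_type out) := by unfold Spec_infer_em_code_py; infer_instance

-- ===== CLAIM (what is proved, stated in full; the proofs are below) =====
def Claim_equal_infer_em_code_py : Prop := ∀ (note_lower : String) (encounter_type : String), Dom_infer_em_code_py note_lower encounter_type → Spec_infer_em_code_py note_lower encounter_type (infer_em_code_py note_lower encounter_type)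

-- ===== LEMMAS AND PROOFS =====
-- the max-of-matched-levels fold equals the first-match priority chain, per class
set_option maxHeartbeats 1000000 in
theorem emMaxLevel_ed (note : String) :
    emMaxLevel note (emLevels "ed") =
    (if PySem.Str.isIn "threat to life" note || PySem.Str.isIn "critical" note ||
        PySem.Str.isIn "stemi" note || PySem.Str.isIn "intubat" note then 2
     else if PySem.Str.isIn "high severity" note || PySem.Str.isIn "admitted" note ||
        PySem.Str.isIn "acute" note then 1 else 0) := by
  rw [show emLevels "ed" =
    [("threat to life", (2:Int)), ("critical", 2), ("stemi", 2), ("intubat", 2),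
     ("high severity", 1), ("admitted", 1), ("acute", 1)] from rfl]
  simp only [emMaxLevel, List.foldl]
  split_ifs <;> simp_all

set_option maxHeartbeats 1000000 in
theorem emMaxLevel_inpt (note : String) :
    emMaxLevel note (emLevels "inpt") =
    (if PySem.Str.isIn "high complexity" note || PySem.Str.isIn "icu" note ||
        PySem.Str.isIn "critical" note then 2
     else if PySem.Str.isIn "moderate" note then 1 else 0) := by
  simp only [emMaxLevel, emLevels]
  split_ifs <;> simp_all <;> (try (split_ifs <;> simp_all))

set_option maxHeartbeats 1000000 in
theorem emMaxLevel_newpt (note : String) :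
    emMaxLevel note (emLevels "newpt") =
    (if PySem.Str.isIn "high complexity" note || PySem.Str.isIn "multiple comorbidities" note then 2
     else if PySem.Str.isIn "moderate complexity" note || PySem.Str.isIn "several" note then 1
     else 0) := by
  simp only [emMaxLevel, emLevels]
  split_ifs <;> simp_all <;> (try (split_ifs <;> simp_all))

-- ===== VERDICT (by name: the statement is the Claim_ definition above) =====
set_option maxHeartbeats 1000000 in
theorem infer_em_code_py_spec : Claim_equal_infer_em_code_py := by
  intro note_lower encounter_type _
  unfold Spec_infer_em_code_py infer_em_code_py infer_em_code_py_alt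
  simp only [List.any_cons, List.any_nil, Bool.or_false, List.map, List.sum_cons, List.sum_nil]
  by_cases hED : (PySem.Str.isIn "emergency" (PySem.Str.lower encounter_type) ||
      PySem.Str.isIn "ed visit" (PySem.Str.lower encounter_type)) = true
  · simp only [hED, if_true, emMaxLevel_ed]
    split_ifs <;> simp_all [emCodes, PySem.List.pyGet?, PySem.List.pyIdx?]
  · simp only [hED, Bool.false_eq_true, if_false]
    by_cases hIn : (PySem.Str.isIn "hospital" (PySem.Str.lower encounter_type) ||
        PySem.Str.isIn "inpatient" (PySem.Str.lower encounter_type) ||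
        PySem.Str.isIn "admission" (PySem.Str.lower encounter_type)) = true
    · simp only [hIn, if_true, emMaxLevel_inpt]
      split_ifs <;> simp_all [emCodes, PySem.List.pyGet?, PySem.List.pyIdx?]
    · simp only [hIn, Bool.false_eq_true, if_false]
      by_cases hNew : (PySem.Str.isIn "new patient" note_lower ||
          PySem.Str.isIn "initial consultation" note_lower) = true
      · simp only [hNew, if_true, emMaxLevel_newpt]
        split_ifs <;> simp_all [emCodes, PySem.List.pyGet?, PySem.List.pyIdx?]
      · simp only [hNew, Bool.false_eq_true, if_false]
        split_ifs <;>
          simp_all [emCodes, PySem.List.pyGet?, PySem.List.pyIdx?] <;> omega
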